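-- pv_equiv track=rewrite | github.com/grapheneaffiliate/h4-polytopic-attention | solve_arc_b13.py | solve_91413438
-- ===== SOURCE A (Python) =====
-- def solve_91413438(grid):
--     h = len(grid)
--     w = len(grid[0])
--     n_nonzero = sum(1 for r in range(h) for c in range(w) if grid[r][c] != 0)
--     n_zero = h * w - n_nonzero
--     out_h = h * n_zero
--     out_w = w * n_zero
--     out = [[0] * out_w for _ in range(out_h)]
--     count = 0
--     for br in range(n_zero):
--         for bc in range(n_zero):
--             if count >= n_nonzero:
--                 break
--             for r in range(h):
--                 for c in range(w):
--                     out[br * h + r][bc * w + c] = grid[r][c]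
--             count += 1
--         if count >= n_nonzero:
--             break
--     return out
-- ===== SOURCE B (Python) =====
-- def solve_91413438(grid):
--     h = len(grid)
--     w = len(grid[0])
--     n_nonzero = sum(1 for row in grid for v in row[:w] if v != 0)
--     n_zero = h * w - n_nonzero
--     out = []
--     for br in range(n_zero):
--         k = min(max(n_nonzero - br * n_zero, 0), n_zero)
--         for row in grid:
--             out.append(row[:w] * k + [0] * (w * (n_zero - k)))
--     return out
-- ===== Notes on version B (the rewrite author's own statement) =====
-- stated objective: alternative
-- what changed: Instead of allocating an all-zero output matrix and mutating it cell by cell with a count-and-break nested block-copy loop, B computes per block-row the number of filled blocks arithmetically (min/max clamp) and builds each output row directly by list repetition and concatenation of width-w row slices.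
import Mathlib
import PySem

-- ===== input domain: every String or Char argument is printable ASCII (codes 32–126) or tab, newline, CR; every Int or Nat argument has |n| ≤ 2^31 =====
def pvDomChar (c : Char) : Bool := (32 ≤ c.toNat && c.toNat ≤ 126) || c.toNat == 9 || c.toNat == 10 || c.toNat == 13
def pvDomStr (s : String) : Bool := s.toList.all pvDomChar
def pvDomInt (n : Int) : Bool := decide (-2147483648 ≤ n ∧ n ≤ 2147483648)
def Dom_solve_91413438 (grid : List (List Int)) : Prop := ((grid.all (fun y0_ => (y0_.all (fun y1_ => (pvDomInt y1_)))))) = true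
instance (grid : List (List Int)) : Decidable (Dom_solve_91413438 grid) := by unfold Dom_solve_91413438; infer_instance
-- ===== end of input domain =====

-- B rebuilds the output per block-row with an arithmetic fill count and row repetition/concatenation
-- instead of A's mutate-in-place count-and-break block-copy loops (objective: alternative).


-- ===== PORT A =====
-- out[br*h+r][bc*w+c] = grid[r][c] : in-place 2-D assignment, ported as List.modify/List.set;
-- indices are always in range on Pre_, and grid[r][c] reads are ported with getD (in range on Pre_).
def pvFillBlock (grid : List (List Int)) (h w br bc : Nat) (out : List (List Int)) : List (List Int) :=
  (List.range h).foldl (fun o r =>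
    (List.range w).foldl (fun o c =>
      o.modify (br * h + r) (fun row => row.set (bc * w + c) ((grid.getD r []).getD c 0))) o) out

def solve_91413438 (grid : List (List Int)) : List (List Int) :=
  let h := grid.length
  let w := (grid.headD []).length            -- len(grid[0]); grid ≠ [] on Pre_
  let n_nonzero := (List.range h).foldl (fun a r =>
    (List.range w).foldl (fun a c => if (grid.getD r []).getD c 0 ≠ 0 then a + 1 else a) a) 0
  let n_zero := h * w - n_nonzero            -- Nat subtraction; n_nonzero ≤ h*w always
  let out0 := List.replicate (h * n_zero) (List.replicate (w * n_zero) (0 : Int))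
  -- the 'break' fires exactly when count ≥ n_nonzero, and count never decreases,
  -- so breaking is ported as skipping the remaining iterations
  let res := (List.range n_zero).foldl (fun s br =>
      (List.range n_zero).foldl (fun s bc =>
        if s.2 ≥ n_nonzero then s
        else (pvFillBlock grid h w br bc s.1, s.2 + 1)) s) (out0, 0)
  res.1

-- ===== PORT B =====
def solve_91413438_alt (grid : List (List Int)) : List (List Int) :=
  let h := grid.length
  let w := (grid.headD []).length            -- len(grid[0]); grid ≠ [] on Pre_
  let n_nonzero := grid.foldl (fun a row =>
    (PySem.List.slice row none (some (w : Int))).foldl (fun a v => if v ≠ 0 then a + 1 else a) a) 0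
  let n_zero := h * w - n_nonzero
  -- k = min(max(n_nonzero - br*n_zero, 0), n_zero): Nat subtraction is exactly max(· - ·, 0)
  (List.range n_zero).foldl (fun out br =>
    let k := min (n_nonzero - br * n_zero) n_zero
    out ++ grid.map (fun row =>
      (List.replicate k (PySem.List.slice row none (some (w : Int)))).flatten
        ++ List.replicate (w * (n_zero - k)) (0 : Int))) []

-- ===== PRECONDITION & SPEC =====
-- Pre_ excludes exactly the inputs on which A raises IndexError: the empty grid (grid[0])
-- and grids with a row shorter than row 0 (grid[r][c] for c < w).
def Pre_solve_91413438 (grid : List (List Int)) : Prop :=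
  grid ≠ [] ∧ ∀ row ∈ grid, (grid.headD []).length ≤ row.length
instance (grid : List (List Int)) : Decidable (Pre_solve_91413438 grid) := by
  unfold Pre_solve_91413438; infer_instance

def pvWitness_solve_91413438 : List (List Int) := [[1, 0], [0, 2]]

def Spec_solve_91413438 (grid : List (List Int)) (out : List (List Int)) : Prop := out = solve_91413438_alt grid
instance (grid : List (List Int)) (out : List (List Int)) : Decidable (Spec_solve_91413438 grid out) := by unfold Spec_solve_91413438; infer_instance

-- ===== CLAIM (what is proved, stated in full; the proofs are below) =====
def Claim_equal_solve_91413438 : Prop := ∀ (grid : List (List Int)), Dom_solve_91413438 grid → Pre_solve_91413438 grid → Spec_solve_91413438 grid (solve_91413438 grid)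

-- ===== LEMMAS AND PROOFS =====

-- row built by B for a block-row in which k blocks are filled
def pvRowB (w Z k : Nat) (row : List Int) : List Int :=
  (List.replicate k row).flatten ++ List.replicate (w * (Z - k)) (0 : Int)

-- the one-row effect of A's inner copy loop for block column bc
def pvRowFill (w : Nat) (row : List Int) (bc : Nat) (x : List Int) : List Int :=
  (List.range w).foldl (fun o c => o.set (bc * w + c) (row.getD c 0)) x

-- band of h rows after k blocks are filled, indexed form (rows truncated to width w)
def pvBandA (grid : List (List Int)) (w Z k : Nat) : List (List Int) :=
  (List.range grid.length).map (fun r => pvRowB w Z k ((grid.getD r []).take w))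

theorem pv_getD_take (row : List Int) (c w : Nat) (hc : c < w) :
    (row.take w).getD c 0 = row.getD c 0 := by
  simp [List.getD_eq_getElem?_getD, List.getElem?_take_of_lt hc]

-- A only reads the first w cells of each row
theorem pv_rowFill_take (w : Nat) (row : List Int) (bc : Nat) (x : List Int) :
    pvRowFill w row bc x = pvRowFill w (row.take w) bc x := by
  unfold pvRowFill
  apply PySem.List.foldl_congr_mem
  intro acc c hc
  rw [pv_getD_take row c w (List.mem_range.mp hc)]

-- ---- small list lemmas ----

theorem pv_modify_modify {α : Type} (l : List α) (i : Nat) (f g : α → α) :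
    (l.modify i f).modify i g = l.modify i (fun x => g (f x)) := by
  apply List.ext_getElem
  · simp
  · intro j h1 h2
    simp only [List.getElem_modify]
    split_ifs <;> simp_all

theorem pv_modify_id {α : Type} (l : List α) (i : Nat) :
    l.modify i (fun x => x) = l := by
  apply List.ext_getElem
  · simp
  · intro j h1 h2
    simp only [List.getElem_modify]
    split <;> rfl

theorem pv_modify_append {α : Type} (pre ys : List α) (i : Nat) (f : α → α) :
    (pre ++ ys).modify (pre.length + i) f = pre ++ ys.modify i f := by
  apply List.ext_getElem
  · simp
  · intro j h1 h2
    simp only [List.getElem_modify, List.getElem_append]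
    split_ifs <;> first | rfl | omega

theorem pv_foldl_modify_same {α γ : Type} (l : List γ) (i : Nat) (g : γ → α → α) (o : List α) :
    l.foldl (fun o x => o.modify i (g x)) o
      = o.modify i (fun y => l.foldl (fun y x => g x y) y) := by
  induction l generalizing o with
  | nil => simp [pv_modify_id]
  | cons a l ih => simp only [List.foldl_cons]; rw [ih, pv_modify_modify]

theorem pv_set_append {α : Type} (pre ys : List α) (n : Nat) (v : α) :
    (pre ++ ys).set (pre.length + n) v = pre ++ ys.set n v := by
  rw [List.set_append]
  simp

theorem pv_foldl_set_offset (l : List Nat) (f : Nat → Int) (pre ys : List Int) :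
    l.foldl (fun o c => o.set (pre.length + c) (f c)) (pre ++ ys)
      = pre ++ l.foldl (fun o c => o.set c (f c)) ys := by
  induction l generalizing ys with
  | nil => simp
  | cons a l ih => simp only [List.foldl_cons]; rw [pv_set_append, ih]

theorem pv_foldl_set_cons (l : List Nat) (f : Nat → Int) (a : Int) (ys : List Int) :
    l.foldl (fun o c => o.set (c + 1) (f c)) (a :: ys)
      = a :: l.foldl (fun o c => o.set c (f c)) ys := by
  induction l generalizing ys with
  | nil => simp
  | cons b l ih => simp only [List.foldl_cons, List.set_cons_succ]; rw [ih]

theorem pv_fill_row (row : List Int) : ∀ ys : List Int, row.length ≤ ys.length →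
    (List.range row.length).foldl (fun o c => o.set c (row.getD c 0)) ys
      = row ++ ys.drop row.length := by
  induction row with
  | nil => simp
  | cons a row ih =>
    intro ys hlen
    cases ys with
    | nil => simp at hlen
    | cons y ys =>
      simp only [List.length_cons, List.range_succ_eq_map, List.foldl_cons, List.foldl_map]
      simp only [List.getD_cons_zero, List.set_cons_zero, List.getD_cons_succ, Nat.succ_eq_add_one]
      rw [pv_foldl_set_cons (f := fun c => row.getD c 0), ih ys (by simpa using hlen)]
      simp

theorem pv_flatten_replicate_length (k : Nat) (row : List Int) :
    ((List.replicate k row).flatten).length = k * row.length := by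
  induction k with
  | zero => simp
  | succ k ih => simp [List.replicate_succ, ih, Nat.succ_mul, Nat.add_comm]

theorem pv_row_step (w Z k : Nat) (row : List Int) (hw : row.length = w) (hk : k < Z) :
    pvRowFill w row k (pvRowB w Z k row) = pvRowB w Z (k + 1) row := by
  unfold pvRowFill pvRowB
  have hlen : ((List.replicate k row).flatten).length = k * w := by
    rw [pv_flatten_replicate_length, hw]
  rw [show (fun (o : List Int) (c : Nat) => o.set (k * w + c) (row.getD c 0))
        = fun o c => o.set (((List.replicate k row).flatten).length + c) (row.getD c 0) by
      funext o c; rw [hlen]]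
  rw [pv_foldl_set_offset]
  rw [show w = row.length from hw.symm, pv_fill_row row _ (by
    simp only [List.length_replicate]
    calc row.length = row.length * 1 := (Nat.mul_one _).symm
      _ ≤ row.length * (Z - k) := Nat.mul_le_mul_left _ (by omega))]
  rw [List.drop_replicate]
  have harith : row.length * (Z - k) - row.length = row.length * (Z - (k + 1)) := by
    rw [Nat.mul_sub, Nat.mul_sub, Nat.mul_succ]; omega
  rw [harith, show k + 1 = k + 1 from rfl]
  rw [List.replicate_succ' (n := k), List.flatten_append]
  simp [List.append_assoc]

theorem pv_foldl_factor {α γ : Type} (l : List γ) (F G : List α → γ → List α) (pre : List α)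
    (h : ∀ ys x, F (pre ++ ys) x = pre ++ G ys x) :
    ∀ ys, l.foldl F (pre ++ ys) = pre ++ l.foldl G ys := by
  induction l with
  | nil => simp
  | cons a l ih => intro ys; simp only [List.foldl_cons]; rw [h, ih]

theorem pv_fillBlock_eq (grid : List (List Int)) (h w br bc : Nat) (out : List (List Int)) :
    pvFillBlock grid h w br bc out
      = (List.range h).foldl (fun o r => o.modify (br * h + r) (pvRowFill w (grid.getD r []) bc)) out := by
  unfold pvFillBlock
  have : (fun (o : List (List Int)) (r : Nat) =>
      (List.range w).foldl (fun o c =>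
        o.modify (br * h + r) (fun row => row.set (bc * w + c) ((grid.getD r []).getD c 0))) o)
      = fun o r => o.modify (br * h + r) (pvRowFill w (grid.getD r []) bc) := by
    funext o r
    rw [pv_foldl_modify_same (g := fun (c : Nat) (row : List Int) => row.set (bc * w + c) ((grid.getD r []).getD c 0))]
    rfl
  rw [this]

theorem pv_bandA_length (grid : List (List Int)) (w Z k : Nat) :
    (pvBandA grid w Z k).length = grid.length := by
  unfold pvBandA; simp

theorem pv_modify_append0 {α : Type} (pre ys : List α) (i : Nat) (f : α → α)
    (hi : i = pre.length) : (pre ++ ys).modify i f = pre ++ ys.modify 0 f := by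
  subst hi
  simpa using pv_modify_append pre ys 0 f

-- one pass of per-row modifications over the first n rows
theorem pv_pass (g : Nat → List Int → List Int) :
    ∀ (n : Nat) (l : List (List Int)), n ≤ l.length →
    (List.range n).foldl (fun o r => o.modify r (g r)) l
      = ((List.range n).map (fun r => g r (l.getD r []))) ++ l.drop n := by
  intro n
  induction n with
  | zero => simp
  | succ n ih =>
    intro l hn
    rw [List.range_succ, List.foldl_append, ih l (by omega)]
    simp only [List.foldl_cons, List.foldl_nil]
    have hmlen : ((List.range n).map (fun r => g r (l.getD r []))).length = n := by simp
    have hdrop : l.drop n = l[n] :: l.drop (n + 1) := List.drop_eq_getElem_cons (by omega)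
    have hget : l.getD n [] = l[n] := by
      rw [List.getD_eq_getElem?_getD, List.getElem?_eq_getElem (by omega)]; rfl
    rw [pv_modify_append0 _ _ _ _ hmlen.symm, hdrop]
    simp only [List.modify, List.modifyTailIdx]
    simp [List.modifyTailIdx.go, List.modifyHead,
      List.getElem?_eq_getElem (show n < l.length by omega)]
    rfl

-- the band after A fills blocks 0..k-1 of block-row br (suffix rest untouched)
theorem pv_band (grid : List (List Int)) (w Z : Nat)
    (hrow : ∀ r < grid.length, w ≤ (grid.getD r []).length) :
    ∀ (k : Nat), k ≤ Z → ∀ (rest : List (List Int)),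
    (List.range k).foldl (fun o bc =>
        (List.range grid.length).foldl (fun o r => o.modify r (pvRowFill w (grid.getD r []) bc)) o)
      (List.replicate grid.length (List.replicate (w * Z) (0 : Int)) ++ rest)
      = pvBandA grid w Z k ++ rest := by
  intro k
  induction k with
  | zero =>
    intro _ rest
    simp only [List.range_zero, List.foldl_nil]
    congr 1
    unfold pvBandA pvRowB
    rw [show ((List.range grid.length).map fun r => (List.replicate 0 ((grid.getD r []).take w)).flatten
          ++ List.replicate (w * (Z - 0)) (0:Int))
        = (List.range grid.length).map (fun _ => List.replicate (w * Z) (0:Int)) by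
      apply List.map_congr_left; intro r _; simp]
    simp [List.map_const']
  | succ k ih =>
    intro hk rest
    rw [List.range_succ, List.foldl_append, ih (by omega) rest]
    simp only [List.foldl_cons, List.foldl_nil]
    have hlen : grid.length ≤ (pvBandA grid w Z k ++ rest).length := by
      simp [pvBandA]
    rw [pv_pass _ _ _ hlen]
    have hdrop : (pvBandA grid w Z k ++ rest).drop grid.length = rest := by
      rw [show grid.length = (pvBandA grid w Z k).length from (pv_bandA_length grid w Z k).symm]
      exact List.drop_left
    rw [hdrop]
    congr 1
    rw [show pvBandA grid w Z (k + 1)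
          = (List.range grid.length).map (fun r => pvRowB w Z (k + 1) ((grid.getD r []).take w)) from rfl]
    apply List.map_congr_left
    intro r hr
    have hr' : r < grid.length := List.mem_range.mp hr
    have hget : (pvBandA grid w Z k ++ rest).getD r [] = pvRowB w Z k ((grid.getD r []).take w) := by
      rw [List.getD_eq_getElem?_getD,
        List.getElem?_append_left (by rw [pv_bandA_length]; exact hr')]
      simp [pvBandA, List.getElem?_range hr']
    rw [hget, pv_rowFill_take,
      pv_row_step w Z k _ (by
        have hwr := hrow r hr'
        rw [List.getD_eq_getElem?_getD] at hwr
        simp [List.length_take]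
        omega) (by omega)]

-- the gated inner loop fills exactly min(N - c0, Zn) consecutive blocks
theorem pv_gate (fill : Nat → List (List Int) → List (List Int)) (N : Nat) :
    ∀ (Zn : Nat) (out : List (List Int)) (c0 : Nat),
    (List.range Zn).foldl (fun s bc => if s.2 ≥ N then s else (fill bc s.1, s.2 + 1)) (out, c0)
      = ((List.range (min (N - c0) Zn)).foldl (fun o bc => fill bc o) out, c0 + min (N - c0) Zn) := by
  intro Zn
  induction Zn with
  | zero => simp
  | succ Zn ih =>
    intro out c0
    rw [List.range_succ, List.foldl_append, ih]
    simp only [List.foldl_cons, List.foldl_nil]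
    by_cases hc : N ≤ c0 + min (N - c0) Zn
    · have hmin : min (N - c0) (Zn + 1) = min (N - c0) Zn := by omega
      rw [if_pos (by simpa using hc), hmin]
    · have hz : min (N - c0) Zn = Zn := by omega
      have hmin : min (N - c0) (Zn + 1) = Zn + 1 := by omega
      rw [if_neg (by simpa using hc), hmin, List.range_succ, List.foldl_append]
      simp only [hz, List.foldl_cons, List.foldl_nil, Prod.mk.injEq]
      exact ⟨trivial, by omega⟩

def pvPrefix (grid : List (List Int)) (w Z N br : Nat) : List (List Int) :=
  ((List.range br).map (fun b => pvBandA grid w Z (min (N - b * Z) Z))).flatten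

theorem pv_prefix_length (grid : List (List Int)) (w Z N : Nat) :
    ∀ br, (pvPrefix grid w Z N br).length = br * grid.length := by
  intro br
  induction br with
  | zero => simp [pvPrefix]
  | succ br ih =>
    unfold pvPrefix at *
    rw [List.range_succ, List.map_append, List.flatten_append]
    simp [ih, pv_bandA_length, Nat.succ_mul]

theorem pv_outer (grid : List (List Int)) (w Z N : Nat)
    (hrow : ∀ r < grid.length, w ≤ (grid.getD r []).length) :
    ∀ br, br ≤ Z →
    (List.range br).foldl (fun s b =>
        (List.range Z).foldl (fun s bc =>
          if s.2 ≥ N then s else (pvFillBlock grid grid.length w b bc s.1, s.2 + 1)) s)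
      (List.replicate (grid.length * Z) (List.replicate (w * Z) (0 : Int)), 0)
      = (pvPrefix grid w Z N br
          ++ List.replicate ((Z - br) * grid.length) (List.replicate (w * Z) (0 : Int)),
         min N (br * Z)) := by
  intro br
  induction br with
  | zero => simp [pvPrefix, Nat.mul_comm]
  | succ br ih =>
    intro hbr
    rw [List.range_succ, List.foldl_append, ih (by omega)]
    simp only [List.foldl_cons, List.foldl_nil]
    rw [pv_gate]
    have hk : min (N - min N (br * Z)) Z = min (N - br * Z) Z := by
      generalize br * Z = p; omega
    have hcount : min N (br * Z) + min (N - br * Z) Z = min N ((br + 1) * Z) := by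
      have hexp : (br + 1) * Z = br * Z + Z := by ring
      rw [hexp]; generalize br * Z = p; omega
    rw [hk, hcount]
    congr 1
    -- now the fill part
    have hkZ : min (N - br * Z) Z ≤ Z := Nat.min_le_right _ _
    have hpre : (pvPrefix grid w Z N br).length = br * grid.length := pv_prefix_length _ _ _ _ _
    have hsplit : List.replicate ((Z - br) * grid.length) (List.replicate (w * Z) (0 : Int))
        = List.replicate grid.length (List.replicate (w * Z) (0 : Int))
          ++ List.replicate ((Z - (br + 1)) * grid.length) (List.replicate (w * Z) (0 : Int)) := by
      rw [← List.replicate_add]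
      congr 1
      have : Z - br = 1 + (Z - (br + 1)) := by omega
      rw [this, Nat.add_mul, Nat.one_mul]
    rw [hsplit]
    have hfactor : ∀ ys bc, pvFillBlock grid grid.length w br bc (pvPrefix grid w Z N br ++ ys)
        = pvPrefix grid w Z N br
          ++ (List.range grid.length).foldl (fun o r => o.modify r (pvRowFill w (grid.getD r []) bc)) ys := by
      intro ys bc
      rw [pv_fillBlock_eq]
      rw [show (fun (o : List (List Int)) (r : Nat) => o.modify (br * grid.length + r) (pvRowFill w (grid.getD r []) bc))
            = fun o r => o.modify ((pvPrefix grid w Z N br).length + r) (pvRowFill w (grid.getD r []) bc) by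
          funext o r; rw [hpre]]
      exact pv_foldl_factor _ _ _ _ (fun ys r => pv_modify_append _ _ _ _) ys
    rw [pv_foldl_factor (List.range (min (N - br * Z) Z))
          (fun o bc => pvFillBlock grid grid.length w br bc o)
          (fun o bc => (List.range grid.length).foldl (fun o r => o.modify r (pvRowFill w (grid.getD r []) bc)) o)
          (pvPrefix grid w Z N br)
          (fun ys bc => hfactor ys bc)]
    rw [pv_band grid w Z hrow (min (N - br * Z) Z) hkZ]
    unfold pvPrefix
    rw [List.range_succ, List.map_append, List.flatten_append]
    simp [List.append_assoc]

-- B's append loop is a flatten of bands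
theorem pv_foldl_append {α γ : Type} (l : List γ) (f : γ → List α) :
    ∀ a : List α, l.foldl (fun acc x => acc ++ f x) a = a ++ (l.map f).flatten := by
  induction l with
  | nil => simp
  | cons x l ih => intro a; simp only [List.foldl_cons, List.map_cons, List.flatten_cons]; rw [ih, List.append_assoc]

-- indexed map over getD = plain map
theorem pv_map_getD {β : Type} (l : List (List Int)) (f : List Int → β) :
    (List.range l.length).map (fun r => f (l.getD r [])) = l.map f := by
  induction l with
  | nil => simp
  | cons a l ih =>
    simp only [List.length_cons, List.range_succ_eq_map, List.map_cons, List.map_map]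
    simp only [List.getD_cons_zero, Function.comp_def, Nat.succ_eq_add_one, List.getD_cons_succ]
    rw [ih]

-- indexed fold over getD = plain fold
theorem pv_foldl_range_getD {α β : Type} (l : List α) (d : α) (f : β → α → β) :
    ∀ a, (List.range l.length).foldl (fun acc i => f acc (l.getD i d)) a = l.foldl f a := by
  induction l with
  | nil => simp
  | cons x l ih =>
    intro a
    simp only [List.length_cons, List.range_succ_eq_map, List.foldl_cons, List.foldl_map]
    simp only [List.getD_cons_zero, Nat.succ_eq_add_one, List.getD_cons_succ]
    rw [ih]

-- A's index-based count of nonzeros in the first w cells equals B's count over sliced rows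
theorem pv_count_eq (grid : List (List Int)) (w : Nat)
    (hrow : ∀ row ∈ grid, w ≤ row.length) :
    (List.range grid.length).foldl (fun a r =>
        (List.range w).foldl (fun a c => if (grid.getD r []).getD c 0 ≠ 0 then a + 1 else a) a) 0
      = grid.foldl (fun a row => (row.take w).foldl (fun a v => if v ≠ 0 then a + 1 else a) a) 0 := by
  rw [pv_foldl_range_getD grid [] (fun a row =>
        (List.range w).foldl (fun a c => if row.getD c 0 ≠ 0 then a + 1 else a) a) 0]
  apply PySem.List.foldl_congr_mem
  intro a row hmem
  have htake : (row.take w).length = w := by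
    have := hrow row hmem; simp; omega
  have hcongr : (List.range w).foldl (fun a c => if row.getD c 0 ≠ 0 then a + 1 else a) a
      = (List.range w).foldl (fun a c => if (row.take w).getD c 0 ≠ 0 then a + 1 else a) a := by
    apply PySem.List.foldl_congr_mem
    intro acc c hc
    rw [pv_getD_take row c w (List.mem_range.mp hc)]
  have hfold := pv_foldl_range_getD (row.take w) 0 (fun a v => if v ≠ 0 then a + 1 else a) a
  rw [htake] at hfold
  exact hcongr.trans hfold

-- ===== VERDICT (by name: the statement is the Claim_ definition above) =====
theorem solve_91413438_spec : Claim_equal_solve_91413438 := by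
  intro grid _dom hpre
  obtain ⟨hne, hrect⟩ := hpre
  unfold Spec_solve_91413438
  show solve_91413438 grid = solve_91413438_alt grid
  simp only [solve_91413438, solve_91413438_alt, PySem.List.slice_to_natCast]
  rw [pv_count_eq grid (grid.headD []).length hrect]
  set w := (grid.headD []).length with hw
  set N := grid.foldl (fun a row => (row.take w).foldl (fun a v => if v ≠ 0 then a + 1 else a) a) 0 with hN
  set Z := grid.length * w - N with hZ
  have hrow : ∀ r < grid.length, w ≤ (grid.getD r []).length := by
    intro r hr
    apply hrect
    rw [List.getD_eq_getElem?_getD, List.getElem?_eq_getElem hr]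
    exact List.getElem_mem hr
  rw [pv_outer grid w Z N hrow Z (le_refl Z)]
  rw [pv_foldl_append]
  simp only [Nat.sub_self, Nat.zero_mul, List.replicate_zero, List.append_nil, List.nil_append]
  have hband : ∀ k, pvBandA grid w Z k
      = grid.map (fun row =>
          (List.replicate k (row.take w)).flatten ++ List.replicate (w * (Z - k)) (0 : Int)) := by
    intro k
    unfold pvBandA
    simpa [pvRowB] using pv_map_getD grid (fun row => pvRowB w Z k (row.take w))
  unfold pvPrefix
  congr 1
  apply List.map_congr_left
  intro b _
  exact hband _
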